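-- pv_equiv track=rewrite | github.com/MarkWh1te/codewar_fun | py/count_change.py | count_change_helper
-- ===== SOURCE A (Python) =====
-- def count_change_helper(money, coins):
--     if money < 0:
--         return 0
--     if money == 0:
--         return [[]]
--     results = []
--     min = 0
--     for coin in coins:
--         tmp = count_change_helper(money - coin, coins)
--         if tmp:
--             results += [t + [coin] for t in tmp]
--     return results
-- ===== SOURCE B (Python) =====
-- def count_change_helper(money, coins):
--     if money < 0:
--         return 0
--     table = [[[]]] + [[] for _ in range(money)]
--     for m in range(1, money + 1):
--         acc = []
--         for coin in coins:
--             if 0 < coin <= m: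
--                 acc.extend(t + [coin] for t in table[m - coin])
--         table[m] = acc
--     return table[money]
-- ===== Notes on version B (the rewrite author's own statement) =====
-- stated objective: alternative
-- what changed: Replaced A's top-down recursion over sub-amounts with bottom-up tabulation: a table of all ordered coin sequences summing to m is built once for m = 0..money, each entry assembled from the already-computed smaller entries, yielding the identical sequences in identical order.
-- outside the precondition, e.g. on count_change_helper(-1, [1]): A returns 0, B returns 0; on count_change_helper(2, [0, 1]): A raises RecursionError, B returns [[1, 1]]
import Mathlib
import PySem

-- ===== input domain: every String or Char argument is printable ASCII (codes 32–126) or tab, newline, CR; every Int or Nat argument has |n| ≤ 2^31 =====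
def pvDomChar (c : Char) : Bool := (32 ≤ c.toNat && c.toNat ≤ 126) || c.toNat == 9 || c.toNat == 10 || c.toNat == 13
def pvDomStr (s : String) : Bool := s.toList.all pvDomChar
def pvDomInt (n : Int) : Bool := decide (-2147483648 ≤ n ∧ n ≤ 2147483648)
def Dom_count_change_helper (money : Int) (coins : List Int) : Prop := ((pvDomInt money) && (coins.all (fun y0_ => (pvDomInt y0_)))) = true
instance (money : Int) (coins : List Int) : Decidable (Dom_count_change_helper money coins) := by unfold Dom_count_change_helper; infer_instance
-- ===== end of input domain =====

-- B replaces A's top-down recursion by bottom-up tabulation over amounts 0..money (same sequences, same order): a different decomposition of the same enumeration.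


-- ===== PORT A =====
-- Literal transliteration of A's recursion; 'fuel' only makes the same computation total
-- (inside Pre_ the fuel never runs out). Python's falsy int 0 (money < 0) is represented
-- by [], which behaves identically under the internal 'if tmp:' guard; the top-level
-- money < 0 case (where A returns the int 0, not a list) is excluded by Pre_.
def ccA (fuel : Nat) (money : Int) (coins : List Int) : List (List Int) :=
  match fuel with
  | 0 => []
  | fuel + 1 =>
    if money < 0 then []
    else if money = 0 then [[]]
    else
      coins.foldl (fun results coin =>
        let tmp := ccA fuel (money - coin) coins
        if tmp ≠ [] then results ++ tmp.map (fun t => t ++ [coin]) else results) []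

def count_change_helper (money : Int) (coins : List Int) : List (List Int) :=
  ccA (money.toNat + 1) money coins

-- ===== PORT B =====
-- Transliteration of Source B: build table[0..money] bottom-up, table[m] from earlier entries.
def count_change_helper_alt (money : Int) (coins : List Int) : List (List Int) :=
  if money < 0 then []  -- Python B returns the int 0 here; excluded by Pre_
  else
    let table := (List.range money.toNat).foldl
      (fun table (i : Nat) =>
        let m : Int := (i : Int) + 1
        let acc := coins.foldl (fun acc coin =>
          if 0 < coin ∧ coin ≤ m then
            acc ++ (table.getD (m - coin).toNat []).map (fun t => t ++ [coin])
          else acc) []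
        table ++ [acc])
      [[[]]]
    table.getD money.toNat []

-- ===== PRECONDITION & SPEC =====
-- Pre_ excludes money < 0, where A returns the int 0 (not a value of the declared list
-- type), and money > 0 with some coin ≤ 0, where A recurses forever (RecursionError).
def Pre_count_change_helper (money : Int) (coins : List Int) : Prop :=
  0 ≤ money ∧ (money = 0 ∨ ∀ c ∈ coins, 0 < c)
instance (money : Int) (coins : List Int) : Decidable (Pre_count_change_helper money coins) := by
  unfold Pre_count_change_helper; infer_instance
def pvWitness_count_change_helper : Int × List Int := (5, [1, 2])

def Spec_count_change_helper (money : Int) (coins : List Int) (out : List (List Int)) : Prop := out = count_change_helper_alt money coins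
instance (money : Int) (coins : List Int) (out : List (List Int)) : Decidable (Spec_count_change_helper money coins out) := by unfold Spec_count_change_helper; infer_instance

-- ===== CLAIM (what is proved, stated in full; the proofs are below) =====
def Claim_equal_count_change_helper : Prop := ∀ (money : Int) (coins : List Int), Dom_count_change_helper money coins → Pre_count_change_helper money coins → Spec_count_change_helper money coins (count_change_helper money coins)

-- ===== LEMMAS AND PROOFS =====

-- One-step unfolding of A's port with a variable fuel (prevents runaway unfolding).
theorem ccA_succ (f : Nat) (money : Int) (coins : List Int) :
    ccA (f + 1) money coins =
      if money < 0 then []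
      else if money = 0 then [[]]
      else
        coins.foldl (fun results coin =>
          let tmp := ccA f (money - coin) coins
          if tmp ≠ [] then results ++ tmp.map (fun t => t ++ [coin]) else results) [] := rfl

-- A's recursion returns [] immediately on negative money (any positive fuel).
theorem ccA_neg (f : Nat) (money : Int) (coins : List Int) (h : money < 0) :
    ccA (f + 1) money coins = [] := by
  rw [ccA_succ, if_pos h]

-- Fuel irrelevance for A's port, for positive coins.
theorem ccA_fuel_irrel (coins : List Int) (hc : ∀ c ∈ coins, 0 < c) :
    ∀ (f1 : Nat), ∀ (money : Int) (f2 : Nat), money.toNat < f1 → money.toNat < f2 →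
      ccA f1 money coins = ccA f2 money coins := by
  intro f1
  induction f1 with
  | zero => intro money f2 h1 _; omega
  | succ f1 ih =>
    intro money f2 h1 h2
    cases f2 with
    | zero => omega
    | succ f2 =>
      rw [ccA_succ f1, ccA_succ f2]
      by_cases hneg : money < 0
      · rw [if_pos hneg, if_pos hneg]
      · by_cases hz : money = 0
        · rw [if_neg hneg, if_neg hneg, if_pos hz, if_pos hz]
        · rw [if_neg hneg, if_neg hneg, if_neg hz, if_neg hz]
          apply PySem.List.foldl_congr_mem
          intro acc coin hmem
          have hcpos := hc coin hmem
          have heq : ccA f1 (money - coin) coins = ccA f2 (money - coin) coins := by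
            apply ih <;> omega
          simp only [heq]

-- B's table-building step, named for the invariant proof (same lambda as in the port).
def stepB (coins : List Int) (table : List (List (List Int))) (i : Nat) : List (List (List Int)) :=
  let m : Int := (i : Int) + 1
  let acc := coins.foldl (fun acc coin =>
    if 0 < coin ∧ coin ≤ m then
      acc ++ (table.getD (m - coin).toNat []).map (fun t => t ++ [coin])
    else acc) []
  table ++ [acc]

theorem alt_eq_stepB (money : Int) (coins : List Int) :
    count_change_helper_alt money coins =
      if money < 0 then []
      else ((List.range money.toNat).foldl (stepB coins) [[[]]]).getD money.toNat [] := by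
  unfold count_change_helper_alt stepB
  rfl

-- The table invariant: after j steps the table holds entries 0..j, each equal to A's value.
theorem table_invariant (coins : List Int) (hc : ∀ c ∈ coins, 0 < c) (j : Nat) :
    ((List.range j).foldl (stepB coins) [[[]]]).length = j + 1 ∧
    ∀ k : Nat, k ≤ j →
      ((List.range j).foldl (stepB coins) [[[]]]).getD k [] = ccA (k + 1) (k : Int) coins := by
  induction j with
  | zero =>
    refine ⟨rfl, ?_⟩
    intro k hk
    interval_cases k
    rw [ccA_succ]
    norm_num
  | succ j ih =>
    obtain ⟨hlen, hval⟩ := ih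
    have hstep : (List.range (j + 1)).foldl (stepB coins) [[[]]] =
        stepB coins ((List.range j).foldl (stepB coins) [[[]]]) j := by
      rw [List.range_succ, List.foldl_append]; rfl
    set tbl := (List.range j).foldl (stepB coins) [[[]]] with htbl
    have hacc : (coins.foldl (fun acc coin =>
        if 0 < coin ∧ coin ≤ ((j : Int) + 1) then
          acc ++ (tbl.getD (((j : Int) + 1) - coin).toNat []).map (fun t => t ++ [coin])
        else acc) []) = ccA ((j + 1) + 1) ((j : Int) + 1) coins := by
      have hneg : ¬ ((j : Int) + 1 < 0) := by omega
      have hz : ¬ ((j : Int) + 1 = 0) := by omega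
      rw [ccA_succ (j + 1), if_neg hneg, if_neg hz]
      apply PySem.List.foldl_congr_mem
      intro acc coin hmem
      have hcpos := hc coin hmem
      by_cases hle : coin ≤ (j : Int) + 1
      · rw [if_pos ⟨hcpos, hle⟩]
        have hk' : (((j : Int) + 1) - coin).toNat ≤ j := by omega
        have hcast : ((((j : Int) + 1) - coin).toNat : Int) = (j : Int) + 1 - coin := by omega
        have hv := hval (((j : Int) + 1) - coin).toNat hk'
        rw [hcast] at hv
        have hfuel : ccA ((((j : Int) + 1) - coin).toNat + 1) ((j : Int) + 1 - coin) coins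
            = ccA (j + 1) ((j : Int) + 1 - coin) coins :=
          ccA_fuel_irrel coins hc _ _ _ (by omega) (by omega)
        rw [hv, hfuel]
        by_cases hemp : ccA (j + 1) ((j : Int) + 1 - coin) coins = []
        · simp only [hemp, ne_eq, not_true_eq_false, if_false, List.map_nil, List.append_nil]
        · simp only [ne_eq, hemp, not_false_eq_true, if_true]
      · rw [if_neg (fun h => hle h.2)]
        have htmp : ccA (j + 1) ((j : Int) + 1 - coin) coins = [] :=
          ccA_neg j _ coins (by omega)
        simp only [htmp, ne_eq, not_true_eq_false, if_false]
    constructor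
    · rw [hstep]
      simp [stepB, hlen]
    · intro k hk
      rw [hstep]
      by_cases hkj : k ≤ j
      · have hlt : k < tbl.length := by omega
        simp only [stepB]
        rw [List.getD_append _ _ _ _ hlt]
        exact hval k hkj
      · have hkeq : k = j + 1 := by omega
        subst hkeq
        simp only [stepB]
        rw [List.getD_append_right _ _ _ _ (by omega)]
        have hidx : j + 1 - tbl.length = 0 := by omega
        rw [hidx]
        simp only [List.getD_cons_zero]
        rw [hacc]
        congr 1

theorem main_eq (money : Int) (coins : List Int) (h0 : 0 ≤ money)
    (hc : ∀ c ∈ coins, 0 < c) :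
    count_change_helper money coins = count_change_helper_alt money coins := by
  rw [alt_eq_stepB, if_neg (by omega)]
  obtain ⟨_, hval⟩ := table_invariant coins hc money.toNat
  rw [hval money.toNat (le_refl _)]
  unfold count_change_helper
  congr 1
  omega

-- ===== VERDICT (by name: the statement is the Claim_ definition above) =====
theorem count_change_helper_spec : Claim_equal_count_change_helper := by
  intro money coins _ hpre
  unfold Spec_count_change_helper
  rcases hpre with ⟨h0, hcase⟩
  rcases hcase with h0' | hc
  · subst h0'
    unfold count_change_helper
    rw [alt_eq_stepB, if_neg (by omega), ccA_succ]
    norm_num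
  · exact main_eq money coins h0 hc
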